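-- pv_equiv track=rewrite | github.com/seoy316/programmers | 프로그래머스/1/64061. 크레인 인형뽑기 게임/크레인 인형뽑기 게임.py | solution
-- ===== SOURCE A (Python) =====
-- def solution(board, moves):
--     answer = 0
--     bucket = []
--     board = [list(x) for x in zip(*board)]
--
--     for i in board:
--         while 0 in i:
--             i.remove(0)
--
--     for move in moves:
--         length = len(board[move-1])
--
--         if length == 0:
--             continue
--
--         bucket.append(board[move-1].pop(0))
--
--         if len(bucket) >= 2 and bucket[-1:] == bucket[-2:-1]:
--             bucket.pop()
--             bucket.pop()
--             answer += 2
--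
--     return answer
-- ===== SOURCE B (Python) =====
-- def solution(board, moves):
--     nrows = len(board)
--     ptr = [0] * (len(board[0]) if board else 0)
--     answer = 0
--     bucket = []
--     for move in moves:
--         c = move - 1
--         r = ptr[c]
--         while r < nrows and board[r][c] == 0:
--             r += 1
--         if r == nrows:
--             ptr[c] = r
--             continue
--         ptr[c] = r + 1
--         doll = board[r][c]
--         if bucket and bucket[-1] == doll:
--             bucket.pop()
--             answer += 2
--         else:
--             bucket.append(doll)
--     return answer
-- ===== Notes on version B (the rewrite author's own statement) =====
-- stated objective: alternative
-- what changed: B keeps a read pointer per column and scans the untouched board downward past zeros on demand, instead of A's transpose-the-board, strip-all-zeros-per-column and pop-from-the-front-of-a-rebuilt-column-list approach; B also never rebuilds or shrinks any list of the board.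
-- outside the precondition, e.g. on solution([[1, 2], [1]], [0, 0]): A returns 2, B returns 0
import Mathlib
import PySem

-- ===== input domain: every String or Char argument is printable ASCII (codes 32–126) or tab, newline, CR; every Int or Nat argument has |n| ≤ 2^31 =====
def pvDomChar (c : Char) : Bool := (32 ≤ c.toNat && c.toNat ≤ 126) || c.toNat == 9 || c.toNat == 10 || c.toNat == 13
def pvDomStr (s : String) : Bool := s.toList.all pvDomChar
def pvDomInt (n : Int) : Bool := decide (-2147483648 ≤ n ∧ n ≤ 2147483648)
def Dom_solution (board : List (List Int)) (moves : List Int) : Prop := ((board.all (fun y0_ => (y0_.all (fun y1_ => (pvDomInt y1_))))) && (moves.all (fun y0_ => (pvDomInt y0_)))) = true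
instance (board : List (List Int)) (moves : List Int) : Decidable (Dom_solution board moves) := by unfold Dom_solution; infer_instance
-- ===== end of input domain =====

-- B replaces A's transpose + destructive zero-stripping + column popping by per-column read
-- pointers over the untouched board (objective: alternative decomposition; A also only
-- rebinds a local, so neither version mutates the caller's list).

-- ===== PORT A =====

-- board = [list(x) for x in zip(*board)] : one column per index below the SHORTEST row
def zipT (board : List (List Int)) : List (List Int) :=
  match board with
  | [] => []
  | r :: rs =>
      (List.range (rs.foldl (fun m row => min m row.length) r.length)).map
        (fun j => (r :: rs).map (fun row => row.getD j 0))   -- j is below every row's length here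

-- while 0 in i: i.remove(0)   (list.remove removes the first occurrence = List.erase)
def rmZeros (l : List Int) : List Int :=
  if h : (0 : Int) ∈ l then rmZeros (l.erase 0) else l
termination_by l.length
decreasing_by
  have h1 := List.length_erase_of_mem h
  have h2 : 0 < l.length := List.length_pos_of_mem h
  omega

-- one iteration of A's `for move in moves` loop; state = (answer, bucket, board-of-columns)
def stepA (s : Int × List Int × List (List Int)) (move : Int) : Int × List Int × List (List Int) :=
  let answer := s.1
  let bucket := s.2.1
  let cols := s.2.2
  let col := (PySem.List.pyGet? cols (move - 1)).getD []   -- board[move-1]; Pre_ excludes IndexError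
  if col.length = 0 then (answer, bucket, cols)
  else
    let d := col.headD 0                                    -- board[move-1].pop(0)
    let cols' := PySem.List.pySetD cols (move - 1) col.tail
    let bucket' := bucket ++ [d]                            -- bucket.append(...)
    if 2 ≤ bucket'.length ∧
        PySem.List.slice bucket' (some (-1)) none = PySem.List.slice bucket' (some (-2)) (some (-1)) then
      (answer + 2, bucket'.dropLast.dropLast, cols')        -- bucket.pop(); bucket.pop()
    else (answer, bucket', cols')

def solution (board : List (List Int)) (moves : List Int) : Int :=
  (moves.foldl stepA (0, [], (zipT board).map rmZeros)).1

-- ===== PORT B =====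

-- while r < nrows and board[r][c] == 0: r += 1
def findRow (board : List (List Int)) (nrows : Nat) (c : Int) (r : Nat) : Nat :=
  if r < nrows then
    if (PySem.List.pyGet? (board.getD r []) c).getD 0 = 0 then findRow board nrows c (r + 1)
    else r
  else r
termination_by nrows - r

-- one iteration of B's loop; state = (answer, bucket, ptr)
def stepB (board : List (List Int)) (s : Int × List Int × List Nat) (move : Int) :
    Int × List Int × List Nat :=
  let answer := s.1
  let bucket := s.2.1
  let ptr := s.2.2
  let c := move - 1
  let r := (PySem.List.pyGet? ptr c).getD 0                 -- ptr[c]; Pre_ excludes IndexError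
  let r' := findRow board board.length c r
  if r' = board.length then (answer, bucket, PySem.List.pySetD ptr c r')
  else
    let ptr' := PySem.List.pySetD ptr c (r' + 1)
    let doll := (PySem.List.pyGet? (board.getD r' []) c).getD 0
    if bucket ≠ [] ∧ bucket.getLast? = some doll then (answer + 2, bucket.dropLast, ptr')
    else (answer, bucket ++ [doll], ptr')

def solution_alt (board : List (List Int)) (moves : List Int) : Int :=
  (moves.foldl (stepB board) (0, [], List.replicate (board.headD []).length 0)).1

-- ===== PRECONDITION & SPEC =====

-- Pre_ excludes (a) ragged boards — A's zip(*board) silently truncates them to the shortest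
-- row, an artefact B does not reproduce — and (b) moves whose column index move-1 falls
-- outside the board, where A raises IndexError.
def Pre_solution (board : List (List Int)) (moves : List Int) : Prop :=
  (∀ row ∈ board, row.length = (board.headD []).length) ∧
  (∀ m ∈ moves, 1 - ((board.headD []).length : Int) ≤ m ∧ m ≤ ((board.headD []).length : Int))
instance (board : List (List Int)) (moves : List Int) : Decidable (Pre_solution board moves) := by
  unfold Pre_solution; infer_instance

def pvWitness_solution : List (List Int) × List Int := ([[0, 1], [2, 1]], [1, 2, 2])

def Spec_solution (board : List (List Int)) (moves : List Int) (out : Int) : Prop := out = solution_alt board moves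
instance (board : List (List Int)) (moves : List Int) (out : Int) : Decidable (Spec_solution board moves out) := by unfold Spec_solution; infer_instance

-- ===== CLAIM (what is proved, stated in full; the proofs are below) =====
def Claim_equal_solution : Prop := ∀ (board : List (List Int)) (moves : List Int), Dom_solution board moves → Pre_solution board moves → Spec_solution board moves (solution board moves)

-- ===== LEMMAS AND PROOFS =====

def colOf (board : List (List Int)) (j : Nat) : List Int :=
  board.map (fun row => row.getD j 0)
def nj (n : Nat) (i : Int) : Nat := if 0 ≤ i then i.toNat else n - (-i).toNat
theorem nj_lt {n : Nat} {i : Int} (h1 : -(n : Int) ≤ i) (h2 : i < n) : nj n i < n := by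
  unfold nj; split <;> omega
theorem pyGet?_nj {α : Type} (xs : List α) (i : Int) (h1 : -(xs.length : Int) ≤ i)
    (h2 : i < xs.length) : PySem.List.pyGet? xs i = xs[nj xs.length i]? := by
  unfold nj; simp only [PySem.List.pyGet?, PySem.List.pyIdx?]; split <;> simp_all
theorem pySetD_nj {α : Type} (xs : List α) (i : Int) (v : α) (h1 : -(xs.length : Int) ≤ i)
    (h2 : i < xs.length) : PySem.List.pySetD xs i v = xs.set (nj xs.length i) v := by
  unfold nj; simp only [PySem.List.pySetD, PySem.List.pySet?, PySem.List.pyIdx?]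
  split <;> simp_all
theorem filter_erase_zero (l : List Int) :
    (l.erase 0).filter (· ≠ 0) = l.filter (· ≠ 0) := by
  induction l with
  | nil => rfl
  | cons a l ih =>
    by_cases ha : a = 0
    · subst ha; simp
    · have h1 : (a :: l).erase 0 = a :: l.erase 0 := List.erase_cons_tail (by simpa using ha)
      rw [h1, List.filter_cons, List.filter_cons, ih]

theorem rmZeros_eq_filter (l : List Int) : rmZeros l = l.filter (· ≠ 0) := by
  fun_induction rmZeros l with
  | case1 l h ih => rw [ih, filter_erase_zero]
  | case2 l h =>
    rw [List.filter_eq_self.mpr]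
    intro a ha; simp; rintro rfl; exact h ha

theorem foldl_min_const (rs : List (List Int)) (k : Nat) (h : ∀ row ∈ rs, row.length = k) :
    rs.foldl (fun m row => min m row.length) k = k := by
  induction rs with
  | nil => rfl
  | cons r rs ih =>
    have hr : r.length = k := h r (by simp)
    simp only [List.foldl_cons, hr, min_self]
    exact ih (fun row hrow => h row (by simp [hrow]))

theorem zipT_rect (board : List (List Int))
    (hrect : ∀ row ∈ board, row.length = (board.headD []).length) :
    zipT board = (List.range (board.headD []).length).map (colOf board) := by
  cases board with
  | nil => simp [zipT]
  | cons r rs =>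
    show (List.range (rs.foldl (fun m row => min m row.length) r.length)).map
        (fun j => (r :: rs).map (fun row => row.getD j 0))
      = (List.range (List.headD (r :: rs) []).length).map (colOf (r :: rs))
    rw [foldl_min_const rs r.length (fun row hrow => by
      have := hrect row (by simp [hrow]); simpa using this)]
    rfl

theorem findRow_eq (board : List (List Int)) (c : Int) (j : Nat)
    (hcell : ∀ r : Nat, r < board.length →
      (PySem.List.pyGet? (board.getD r []) c).getD 0 = (colOf board j).getD r 0)
    (r : Nat) (hr : r ≤ board.length) :
    findRow board board.length c r
      = r + (((colOf board j).drop r).takeWhile (fun x => x = 0)).length := by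
  have hlen : (colOf board j).length = board.length := by simp [colOf]
  by_cases h : r < board.length
  · have hdrop : (colOf board j).drop r = (colOf board j).getD r 0 :: (colOf board j).drop (r + 1) := by
      rw [List.getD_eq_getElem _ _ (by omega)]
      exact (List.getElem_cons_drop (by omega)).symm
    rw [findRow, if_pos h, hcell r h, hdrop, List.takeWhile_cons]
    by_cases hz : (colOf board j).getD r 0 = 0
    · rw [if_pos hz, findRow_eq board c j hcell (r+1) (by omega)]
      rw [if_pos (by simpa using hz), List.length_cons]
      omega
    · rw [if_neg hz, if_neg (by simpa using hz)]
      rfl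
  · have hre : r = board.length := by omega
    rw [findRow, if_neg h, hre]
    rw [List.drop_eq_nil_of_le (by omega : (colOf board j).length ≤ board.length)]
    rfl
termination_by board.length - r
theorem bucket_cond (bucket : List Int) (d : Int) :
    (2 ≤ (bucket ++ [d]).length ∧
      PySem.List.slice (bucket ++ [d]) (some (-1)) none
        = PySem.List.slice (bucket ++ [d]) (some (-2)) (some (-1)))
    ↔ (bucket ≠ [] ∧ bucket.getLast? = some d) := by
  rcases List.eq_nil_or_concat bucket with rfl | ⟨ys, y, rfl⟩
  · norm_num
  · simp only [List.concat_eq_append]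
    have h1 : PySem.List.slice ((ys ++ [y]) ++ [d]) (some (-1)) none = [d] := by
      rw [PySem.List.slice_from_neg_one]; simp
    have h2 : PySem.List.slice ((ys ++ [y]) ++ [d]) (some (-2)) (some (-1)) = [y] := by
      simp [PySem.List.slice]
    rw [h1, h2]
    constructor
    · rintro ⟨-, h⟩
      refine ⟨by simp, ?_⟩
      rw [List.getLast?_concat]
      simpa [eq_comm] using h
    · rintro ⟨-, h⟩
      rw [List.getLast?_concat] at h
      refine ⟨by simp, ?_⟩
      simpa [eq_comm] using h
theorem getD_set_self {α : Type} (xs : List α) (j : Nat) (v d : α) (h : j < xs.length) :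
    (xs.set j v).getD j d = v := by
  simp [List.getD_eq_getElem?_getD, h]

theorem getD_set_ne {α : Type} (xs : List α) (j k : Nat) (v d : α) (h : k ≠ j) :
    (xs.set j v).getD k d = xs.getD k d := by
  simp [List.getD_eq_getElem?_getD, List.getElem?_set_ne (by omega : j ≠ k)]

theorem step_sim (board : List (List Int)) (m : Int)
    (hrect : ∀ row ∈ board, row.length = (board.headD []).length)
    (hm : 1 - ((board.headD []).length : Int) ≤ m ∧ m ≤ ((board.headD []).length : Int))
    (ans : Int) (bucket : List Int) (colsA : List (List Int)) (ptr : List Nat)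
    (hclen : colsA.length = (board.headD []).length)
    (hplen : ptr.length = (board.headD []).length)
    (hinv : ∀ j, j < (board.headD []).length →
      ptr.getD j 0 ≤ board.length ∧
      colsA.getD j [] = ((colOf board j).drop (ptr.getD j 0)).filter (· ≠ 0)) :
    (stepA (ans, bucket, colsA) m).1 = (stepB board (ans, bucket, ptr) m).1 ∧
    (stepA (ans, bucket, colsA) m).2.1 = (stepB board (ans, bucket, ptr) m).2.1 ∧
    (stepA (ans, bucket, colsA) m).2.2.length = (board.headD []).length ∧
    (stepB board (ans, bucket, ptr) m).2.2.length = (board.headD []).length ∧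
    (∀ j, j < (board.headD []).length →
      ((stepB board (ans, bucket, ptr) m).2.2).getD j 0 ≤ board.length ∧
      ((stepA (ans, bucket, colsA) m).2.2).getD j []
        = ((colOf board j).drop (((stepB board (ans, bucket, ptr) m).2.2).getD j 0)).filter (· ≠ 0)) := by
  set n := (board.headD []).length with hn
  have hi1 : -(n : Int) ≤ m - 1 := by omega
  have hi2 : m - 1 < (n : Int) := by omega
  set j := nj n (m - 1) with hjdef
  have hj : j < n := nj_lt hi1 hi2
  have hgetA : (PySem.List.pyGet? colsA (m - 1)).getD [] = colsA.getD j [] := by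
    rw [pyGet?_nj colsA (m-1) (by omega) (by omega), hclen, ← hjdef]
    simp [List.getD_eq_getElem?_getD]
  have hgetP : (PySem.List.pyGet? ptr (m - 1)).getD 0 = ptr.getD j 0 := by
    rw [pyGet?_nj ptr (m-1) (by omega) (by omega), hplen, ← hjdef]
    simp [List.getD_eq_getElem?_getD]
  have hsetA : ∀ X, PySem.List.pySetD colsA (m - 1) X = colsA.set j X := by
    intro X
    rw [pySetD_nj colsA (m-1) X (by omega) (by omega), hclen, ← hjdef]
  have hsetP : ∀ q, PySem.List.pySetD ptr (m - 1) q = ptr.set j q := by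
    intro q
    rw [pySetD_nj ptr (m-1) q (by omega) (by omega), hplen, ← hjdef]
  set p := ptr.getD j 0 with hp
  set L := colOf board j with hL
  have hLlen : L.length = board.length := by simp [hL, colOf]
  obtain ⟨hpnr, hcol⟩ := hinv j hj
  have hcell : ∀ r : Nat, r < board.length →
      (PySem.List.pyGet? (board.getD r []) (m - 1)).getD 0 = L.getD r 0 := by
    intro r hr
    have hb : board.getD r [] = board[r] := List.getD_eq_getElem _ _ hr
    have hrowlen : (board[r] : List Int).length = n := hrect _ (board.getElem_mem hr)
    rw [hb, pyGet?_nj _ _ (by rw [hrowlen]; omega) (by rw [hrowlen]; exact hi2), hrowlen, ← hjdef]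
    rw [hL, colOf, List.getD_eq_getElem?_getD, List.getElem?_map, List.getElem?_eq_getElem hr]
    simp [List.getD_eq_getElem?_getD]
  set t := (L.drop p).takeWhile (fun x => x = 0) with ht
  set u := (L.drop p).dropWhile (fun x => x = 0) with hu
  have htu : t ++ u = L.drop p := List.takeWhile_append_dropWhile
  have htulen : t.length + u.length = L.length - p := by
    have := congrArg List.length htu
    simp at this
    omega
  have hfilter_t : t.filter (· ≠ 0) = [] := by
    simp only [List.filter_eq_nil_iff]
    intro a ha
    simpa using List.mem_takeWhile_imp ha
  have hfilterS : (L.drop p).filter (· ≠ 0) = u.filter (· ≠ 0) := by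
    rw [← htu, List.filter_append, hfilter_t, List.nil_append]
  have hr' : findRow board board.length (m - 1) ((PySem.List.pyGet? ptr (m-1)).getD 0) = p + t.length := by
    rw [hgetP]
    exact findRow_eq board (m-1) j hcell p hpnr
  have hdropr' : L.drop (p + t.length) = u := by
    rw [← List.drop_drop, ← htu, List.drop_left]
  rcases hu' : u with - | ⟨d, u'⟩
  · -- exhausted column: both sides skip
    have hcolnil : colsA.getD j [] = [] := by
      rw [hcol, ← hL, ← hp, hfilterS, hu', List.filter_nil]
    have hr'' : p + t.length = board.length := by
      rw [hu'] at htulen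
      simp at htulen
      omega
    simp only [stepA, stepB, hgetA, hr', hcolnil, hsetP, hr'']
    rw [if_pos (show ([] : List Int).length = 0 from rfl), if_pos trivial]
    refine ⟨rfl, rfl, by simpa using hclen, by simpa using hplen, ?_⟩
    intro j' hj'
    by_cases e : j' = j
    · subst e
      rw [getD_set_self _ _ _ _ (by omega)]
      refine ⟨le_refl _, ?_⟩
      rw [hcolnil, ← hL, List.drop_eq_nil_of_le (by omega), List.filter_nil]
    · rw [getD_set_ne _ _ _ _ _ e]
      exact hinv j' hj'
  · -- a doll is found
    have hd0 : ¬ d = 0 := by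
      have := List.head?_dropWhile_not (fun x => decide (x = 0)) (L.drop p)
      rw [← hu, hu'] at this
      simpa using this
    have hcolcons : colsA.getD j [] = d :: u'.filter (· ≠ 0) := by
      rw [hcol, ← hL, ← hp, hfilterS, hu', List.filter_cons, if_pos (by simpa using hd0)]
    have hult : p + t.length < board.length := by
      rw [hu'] at htulen
      simp at htulen
      omega
    have hdoll : (PySem.List.pyGet? (board.getD (p + t.length) []) (m - 1)).getD 0 = d := by
      rw [hcell _ hult, List.getD_eq_getElem?_getD, ← List.head?_drop, hdropr', hu']
      rfl
    simp only [stepA, stepB, hgetA, hr', hcolcons, hsetA, hsetP, hdoll]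
    rw [if_neg (show ¬((d :: u'.filter (· ≠ 0)).length = 0) by simp),
        if_neg (show ¬(p + t.length = board.length) by omega)]
    simp only [List.headD_cons, List.tail_cons]
    have hbc := bucket_cond bucket d
    by_cases hb : bucket ≠ [] ∧ bucket.getLast? = some d
    · rw [if_pos (hbc.mpr hb), if_pos hb]
      refine ⟨rfl, by rw [List.dropLast_concat], by simpa using hclen, by simpa using hplen, ?_⟩
      intro j' hj'
      by_cases e : j' = j
      · subst e
        rw [getD_set_self _ _ _ _ (by omega), getD_set_self _ _ _ _ (by omega)]
        refine ⟨by omega, ?_⟩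
        rw [← hL]
        have : L.drop (p + t.length + 1) = u' := by
          rw [← List.drop_drop, hdropr', hu']
          rfl
        rw [this]
      · rw [getD_set_ne _ _ _ _ _ e, getD_set_ne _ _ _ _ _ e]
        exact hinv j' hj'
    · rw [if_neg (fun hc => hb (hbc.mp hc)), if_neg hb]
      refine ⟨rfl, rfl, by simpa using hclen, by simpa using hplen, ?_⟩
      intro j' hj'
      by_cases e : j' = j
      · subst e
        rw [getD_set_self _ _ _ _ (by omega), getD_set_self _ _ _ _ (by omega)]
        refine ⟨by omega, ?_⟩
        rw [← hL]
        have : L.drop (p + t.length + 1) = u' := by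
          rw [← List.drop_drop, hdropr', hu']
          rfl
        rw [this]
      · rw [getD_set_ne _ _ _ _ _ e, getD_set_ne _ _ _ _ _ e]
        exact hinv j' hj'

theorem loop_sim (board : List (List Int)) (moves : List Int)
    (hrect : ∀ row ∈ board, row.length = (board.headD []).length)
    (hmoves : ∀ m ∈ moves, 1 - ((board.headD []).length : Int) ≤ m ∧ m ≤ ((board.headD []).length : Int))
    (ans : Int) (bucket : List Int) (colsA : List (List Int)) (ptr : List Nat)
    (hclen : colsA.length = (board.headD []).length)
    (hplen : ptr.length = (board.headD []).length)
    (hinv : ∀ j, j < (board.headD []).length →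
      ptr.getD j 0 ≤ board.length ∧
      colsA.getD j [] = ((colOf board j).drop (ptr.getD j 0)).filter (· ≠ 0)) :
    (moves.foldl stepA (ans, bucket, colsA)).1 = (moves.foldl (stepB board) (ans, bucket, ptr)).1 := by
  induction moves generalizing ans bucket colsA ptr with
  | nil => rfl
  | cons m ms ih =>
    obtain ⟨h1, h2, h3, h4, h5⟩ := step_sim board m hrect (hmoves m (by simp)) ans bucket colsA ptr
      hclen hplen hinv
    rw [List.foldl_cons, List.foldl_cons]
    have eA : stepA (ans, bucket, colsA) m
        = ((stepA (ans, bucket, colsA) m).1, (stepA (ans, bucket, colsA) m).2.1,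
           (stepA (ans, bucket, colsA) m).2.2) := rfl
    have eB : stepB board (ans, bucket, ptr) m
        = ((stepA (ans, bucket, colsA) m).1, (stepA (ans, bucket, colsA) m).2.1,
           (stepB board (ans, bucket, ptr) m).2.2) := by
      rw [h1, h2]
    rw [eA, eB]
    exact ih (fun x hx => hmoves x (by simp [hx])) _ _ _ _ h3 h4 h5


-- ===== VERDICT (by name: the statement is the Claim_ definition above) =====
theorem solution_spec : Claim_equal_solution := by
  intro board moves _hdom hpre
  obtain ⟨hrect, hmoves⟩ := hpre
  unfold Spec_solution solution solution_alt
  have hcols : (zipT board).map rmZeros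
      = (List.range (board.headD []).length).map (fun j => rmZeros (colOf board j)) := by
    rw [zipT_rect board hrect, List.map_map]
    rfl
  apply loop_sim board moves hrect hmoves
  · rw [hcols]; simp
  · simp
  · intro j hj
    have hptr : (List.replicate (board.headD []).length (0 : Nat)).getD j 0 = 0 := by
      simp only [List.getD_eq_getElem?_getD, List.getElem?_replicate]
      split <;> rfl
    constructor
    · rw [hptr]; omega
    · rw [hptr, hcols, List.getD_eq_getElem?_getD, List.getElem?_map, List.getElem?_range hj]
      simp [rmZeros_eq_filter]
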